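-- pv_equiv track=rewrite | github.com/pouriya/prss | prss.py | hide_url_path
-- ===== SOURCE A (Python) =====
-- def hide_url_path(url):
--     prefix = ''
--     if url.startswith('http://'):
--         prefix = 'http://'
--         url = url[7:]
--     elif url.startswith('https://'):
--         prefix = 'https://'
--         url = url[8:]
--     url_parts = url.split('/')
--     if len(url_parts) > 1:
--         return prefix + url_parts[0] + '/' + '/'.join([len(x) * '*' for x in url_parts[1:]])
--     return url
-- ===== SOURCE B (Python) =====
-- def hide_url_path(url):
--     prefix = ''
--     for p in ('http://', 'https://'):
--         if url.startswith(p):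
--             prefix = p
--             url = url[len(p):]
--             break
--     out = []
--     seen = False
--     for c in url:
--         if c == '/':
--             seen = True
--             out.append('/')
--         elif seen:
--             out.append('*')
--         else:
--             out.append(c)
--     return prefix + ''.join(out) if seen else url
-- ===== Notes on version B (the rewrite author's own statement) =====
-- stated objective: simpler
-- what changed: Replaces the split-into-parts, per-part asterisk replication and join pipeline with one left-to-right state-machine scan (a seen-slash flag) that copies characters before the first slash and masks non-slash characters after it.
import Mathlib
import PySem

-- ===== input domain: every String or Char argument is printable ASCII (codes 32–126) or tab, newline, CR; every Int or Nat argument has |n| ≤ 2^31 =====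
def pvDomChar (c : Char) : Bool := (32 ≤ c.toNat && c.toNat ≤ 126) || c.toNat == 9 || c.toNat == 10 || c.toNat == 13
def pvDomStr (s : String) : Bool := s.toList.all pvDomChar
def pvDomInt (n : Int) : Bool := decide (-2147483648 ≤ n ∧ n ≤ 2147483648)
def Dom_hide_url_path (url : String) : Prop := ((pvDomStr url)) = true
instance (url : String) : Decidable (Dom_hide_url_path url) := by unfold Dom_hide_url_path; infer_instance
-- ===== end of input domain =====

-- B replaces A's split/replicate/join pipeline by one state-machine scan with a seen-slash flag (objective: simpler).


-- ===== PORT A =====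
def hide_url_path (url : String) : String :=
  let s := url.toList
  let pu : List Char × List Char :=
    if PySem.Chars.startswith s ("http://".toList) then
      ("http://".toList, PySem.Chars.slice s (some 7) none)
    else if PySem.Chars.startswith s ("https://".toList) then
      ("https://".toList, PySem.Chars.slice s (some 8) none)
    else ([], s)
  let parts := PySem.Chars.splitOn pu.2 ("/".toList)
  if 1 < parts.length then
    String.ofList (pu.1 ++ PySem.List.pyGetD parts 0 [] ++ ("/".toList)
      ++ PySem.Chars.join ("/".toList) ((parts.drop 1).map (fun x => List.replicate x.length '*')))
  else
    String.ofList pu.2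

-- ===== PORT B =====
-- 'for p in (…): if url.startswith(p): … break' — first matching prefix, recursion over the tuple
def pvStripPrefix : List (List Char) → List Char → (List Char × List Char)
  | [], s => ([], s)
  | p :: ps, s =>
    if PySem.Chars.startswith s p then (p, s.drop p.length)  -- url[len(p):], len(p) ≥ 0: exact
    else pvStripPrefix ps s

-- the character loop: state = (seen-slash flag, collected output)
def pvMaskStep (st : Bool × List Char) (c : Char) : Bool × List Char :=
  if c = '/' then (true, st.2 ++ ['/'])
  else if st.1 then (st.1, st.2 ++ ['*'])
  else (st.1, st.2 ++ [c])

def hide_url_path_alt (url : String) : String :=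
  let pu := pvStripPrefix ["http://".toList, "https://".toList] url.toList
  let r := pu.2.foldl pvMaskStep (false, [])
  if r.1 then String.ofList (pu.1 ++ r.2) else String.ofList pu.2

-- ===== PRECONDITION & SPEC =====
def Spec_hide_url_path (url : String) (out : String) : Prop := out = hide_url_path_alt url
instance (url : String) (out : String) : Decidable (Spec_hide_url_path url out) := by unfold Spec_hide_url_path; infer_instance

-- ===== CLAIM (what is proved, stated in full; the proofs are below) =====
def Claim_equal_hide_url_path : Prop := ∀ (url : String), Dom_hide_url_path url → Spec_hide_url_path url (hide_url_path url)

-- ===== LEMMAS AND PROOFS =====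

-- reference splitter: mySplit pre l = the parts of (pre ++ l) split at '/', pre having no '/'
def mySplit (pre : List Char) : List Char → List (List Char)
  | [] => [pre]
  | c :: r => if c = '/' then pre :: mySplit [] r else mySplit (pre ++ [c]) r

lemma mySplit_ne_nil (pre l) : mySplit pre l ≠ [] := by
  induction l generalizing pre with
  | nil => simp [mySplit]
  | cons c r ih => by_cases h : c = '/' <;> simp [mySplit, h, ih]

lemma go_spec : ∀ (l : List Char) (fuel : Nat) (cur : List Char) (acc : List (List Char)),
    l.length < fuel →
    PySem.Chars.splitOn.go ['/'] fuel l cur acc = acc.reverse ++ mySplit cur.reverse l := by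
  intro l
  induction l with
  | nil =>
    intro fuel cur acc h
    match fuel, h with
    | fuel+1, _ => simp [PySem.Chars.splitOn.go, mySplit]
  | cons c r ih =>
    intro fuel cur acc h
    match fuel, h with
    | fuel+1, h =>
      by_cases hc : c = '/'
      · subst hc
        have : List.isPrefixOf ['/'] ('/' :: r) = true := by simp [List.isPrefixOf]
        simp only [PySem.Chars.splitOn.go, this, if_pos, List.length_cons, List.drop_succ_cons,
          List.drop_zero, List.length_nil]
        rw [ih fuel [] (cur.reverse :: acc) (by simpa using Nat.lt_of_succ_lt_succ h)]
        simp [mySplit]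
      · have : List.isPrefixOf ['/'] (c :: r) = false := by
          simp [List.isPrefixOf]; exact fun h => absurd h.symm hc
        simp only [PySem.Chars.splitOn.go, this, Bool.false_eq_true, if_neg, not_false_iff]
        rw [ih fuel (c :: cur) acc (by simpa using Nat.lt_of_succ_lt_succ h)]
        simp [mySplit, hc]

lemma splitOn_eq (u : List Char) : PySem.Chars.splitOn u ['/'] = mySplit [] u := by
  have := go_spec u (u.length + 1) [] [] (by omega)
  simpa [PySem.Chars.splitOn] using this

lemma mySplit_len (pre l) : 1 < (mySplit pre l).length ↔ '/' ∈ l := by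
  induction l generalizing pre with
  | nil => simp [mySplit]
  | cons c r ih =>
    by_cases h : c = '/'
    · subst h
      have := mySplit_ne_nil ([] : List Char) r
      simp [mySplit, List.length_pos_iff.mpr this]
    · simp [mySplit, h, ih, Ne.symm h]

lemma mySplit_split (t r : List Char) (h : '/' ∉ t) (pre : List Char) :
    mySplit pre (t ++ '/' :: r) = (pre ++ t) :: mySplit [] r := by
  induction t generalizing pre with
  | nil => simp [mySplit]
  | cons c t' ih =>
    have hc : c ≠ '/' := fun hc => h (hc ▸ List.mem_cons_self)
    simp only [List.cons_append, mySplit, if_neg hc]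
    rw [ih (fun hm => h (List.mem_cons_of_mem _ hm))]
    simp

lemma join_mask (r pre : List Char) :
    PySem.Chars.join ['/'] ((mySplit pre r).map (fun x => List.replicate x.length '*'))
      = List.replicate pre.length '*' ++ r.map (fun c => if c = '/' then '/' else '*') := by
  induction r generalizing pre with
  | nil => simp [mySplit, PySem.Chars.join_singleton]
  | cons c r' ih =>
    by_cases hc : c = '/'
    · subst hc
      have hne := mySplit_ne_nil ([] : List Char) r'
      obtain ⟨q, rest, hqr⟩ := List.exists_cons_of_ne_nil hne
      simp only [mySplit, if_true, List.map_cons, hqr]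
      rw [PySem.Chars.join_cons_cons]
      have hmc : List.replicate q.length '*' :: List.map (fun x => List.replicate x.length '*') rest
          = List.map (fun x => List.replicate x.length '*') (q :: rest) := rfl
      rw [hmc, ← hqr, ih []]
      simp
    · simp only [mySplit, if_neg hc, List.map_cons]
      rw [ih (pre ++ [c])]
      simp [List.replicate_succ']

-- first-slash decomposition
lemma exists_first_slash (u : List Char) (h : '/' ∈ u) :
    ∃ t r, u = t ++ '/' :: r ∧ '/' ∉ t := by
  induction u with
  | nil => simp at h
  | cons c u' ih =>
    by_cases hc : c = '/'
    · exact ⟨[], u', by simp [hc], by simp⟩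
    · obtain ⟨t, r, hu, ht⟩ := ih (by rcases List.mem_cons.mp h with h | h
                                      · exact absurd h.symm hc
                                      · exact h)
      exact ⟨c :: t, r, by simp [hu], by simp [ht, Ne.symm hc]⟩

-- B's fold after the flag is set: everything gets masked
lemma fold_after (u : List Char) (acc : List Char) :
    u.foldl pvMaskStep (true, acc) = (true, acc ++ u.map (fun c => if c = '/' then '/' else '*')) := by
  induction u generalizing acc with
  | nil => simp
  | cons c r ih =>
    by_cases hc : c = '/'
    · subst hc; simp [List.foldl_cons, pvMaskStep, ih]
    · simp [List.foldl_cons, pvMaskStep, hc, ih]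

-- B's fold before any slash: characters are copied
lemma fold_before (u : List Char) (h : '/' ∉ u) (acc : List Char) :
    u.foldl pvMaskStep (false, acc) = (false, acc ++ u) := by
  induction u generalizing acc with
  | nil => simp
  | cons c r ih =>
    have hc : c ≠ '/' := fun hc => h (hc ▸ List.mem_cons_self)
    simp only [List.foldl_cons, pvMaskStep, if_neg hc, Bool.false_eq_true, if_neg, not_false_iff]
    rw [ih (fun hm => h (List.mem_cons_of_mem _ hm))]
    simp

-- characterisation of B's whole fold via the first-slash decomposition
lemma fold_split (t r : List Char) (h : '/' ∉ t) :
    (t ++ '/' :: r).foldl pvMaskStep (false, [])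
      = (true, t ++ '/' :: r.map (fun c => if c = '/' then '/' else '*')) := by
  rw [List.foldl_append, fold_before t h []]
  simp [List.foldl_cons, pvMaskStep, fold_after]

-- core: the two tails agree for every stripped url and prefix
lemma core (pfx u : List Char) :
    (if 1 < (PySem.Chars.splitOn u ['/']).length then
      String.ofList (pfx ++ PySem.List.pyGetD (PySem.Chars.splitOn u ['/']) 0 [] ++ ['/']
        ++ PySem.Chars.join ['/']
            (((PySem.Chars.splitOn u ['/']).drop 1).map (fun x => List.replicate x.length '*')))
    else String.ofList u)
    =
    (if (u.foldl pvMaskStep (false, [])).1 then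
      String.ofList (pfx ++ (u.foldl pvMaskStep (false, [])).2)
    else String.ofList u) := by
  by_cases h : '/' ∈ u
  · obtain ⟨t, r, hu, ht⟩ := exists_first_slash u h
    subst hu
    have hsplit : PySem.Chars.splitOn (t ++ '/' :: r) ['/'] = t :: mySplit [] r := by
      rw [splitOn_eq, mySplit_split t r ht]; simp
    have hlen : 1 < (PySem.Chars.splitOn (t ++ '/' :: r) ['/']).length := by
      rw [hsplit]
      have := List.length_pos_iff.mpr (mySplit_ne_nil ([] : List Char) r)
      simp only [List.length_cons]
      omega
    rw [fold_split t r ht, if_pos hlen]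
    simp only [if_pos]
    rw [hsplit]
    simp only [PySem.List.pyGetD, List.drop_succ_cons, List.drop_zero]
    rw [join_mask r []]
    simp
  · rw [fold_before u h []]
    have hlen : ¬ 1 < (PySem.Chars.splitOn u ['/']).length := by
      rw [splitOn_eq]; exact fun hl => h ((mySplit_len [] u).mp hl)
    rw [if_neg hlen]
    simp

-- the two prefix-stripping styles produce the same pair
lemma strip_eq (s : List Char) :
    (if PySem.Chars.startswith s ("http://".toList) then
      (("http://".toList : List Char), PySem.Chars.slice s (some 7) none)
    else if PySem.Chars.startswith s ("https://".toList) then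
      ("https://".toList, PySem.Chars.slice s (some 8) none)
    else ([], s))
    = pvStripPrefix ["http://".toList, "https://".toList] s := by
  simp only [pvStripPrefix, PySem.Chars.slice_eq_listSlice]
  split_ifs <;> simp [PySem.List.slice_from]

-- ===== VERDICT (by name: the statement is the Claim_ definition above) =====
theorem hide_url_path_spec : Claim_equal_hide_url_path := by
  intro url _
  unfold Spec_hide_url_path hide_url_path hide_url_path_alt
  rw [← strip_eq url.toList]
  exact core _ _
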